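-- pv_equiv track=rewrite | github.com/ciortanmadalina/complete_digest_exhaustive_search | optimised.py | bitewiseCutpointsToSegments
-- ===== SOURCE A (Python) =====
-- def bitewiseCutpointsToSegments(inputArray):
--     '''
--     This method is the inverse of segmentsToBitewiseCutpoints
--     For instance for [0 1 0 0 1 0 0 1 0 1] it produces the sorted [1, 1, 2, 3, 3]
--
--     This method will be used to check of the segments resulting from the
--     combination of k lines match the total input difference
--     :param inputArray:
--     :return: segment sizes array from bitwise cutpoints input
--     '''
--     segments = []
--     segmentSize = -1
--     for bit in inputArray:
--         if bit == 0:
--             segmentSize +=1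
--         else:
--             segments.append(segmentSize + 1)
--             segmentSize = 0
--     segments.append(segmentSize + 1) #add the last element
--     segments.sort()
--     return segments
-- ===== SOURCE B (Python) =====
-- def bitewiseCutpointsToSegments(inputArray):
--     # Counting-sort formulation: a segment size equals the index distance to the
--     # previous cutpoint (at most len(inputArray)), so tally sizes in a table and
--     # emit them in increasing order instead of comparison-sorting them.
--     n = len(inputArray)
--     counts = [0] * (n + 1)  # counts[s] = multiplicity of segment size s
--     prev = 0                # index of the previous cutpoint (0 before any)
--     for i, bit in enumerate(inputArray):
--         if bit != 0:
--             counts[i - prev] += 1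
--             prev = i
--     counts[n - prev] += 1   # the segment after the last cutpoint
--     return [s for s in range(n + 1) for _ in range(counts[s])]
-- ===== Notes on version B (the rewrite author's own statement) =====
-- stated objective: alternative
-- what changed: Replaced the run-length accumulator plus comparison sort by a single cutpoint-distance pass that tallies segment sizes (bounded by len(inputArray)) into a counting table and emits them in increasing order (counting sort); asymptotically O(n) but not measurably faster in CPython, where A's sort runs in C.
import Mathlib
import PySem

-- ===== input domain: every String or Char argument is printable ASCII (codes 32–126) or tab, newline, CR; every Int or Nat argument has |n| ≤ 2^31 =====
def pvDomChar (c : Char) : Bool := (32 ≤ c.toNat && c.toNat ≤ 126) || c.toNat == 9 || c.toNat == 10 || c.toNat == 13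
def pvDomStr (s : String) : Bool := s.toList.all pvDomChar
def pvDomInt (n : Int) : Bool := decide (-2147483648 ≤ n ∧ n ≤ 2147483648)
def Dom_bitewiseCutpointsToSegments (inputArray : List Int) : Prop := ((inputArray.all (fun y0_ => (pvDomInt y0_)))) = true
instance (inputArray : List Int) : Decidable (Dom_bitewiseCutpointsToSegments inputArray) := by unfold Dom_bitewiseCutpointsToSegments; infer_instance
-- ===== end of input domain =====

-- B replaces the accumulator-then-comparison-sort of A by a counting sort over
-- cutpoint index distances (segment sizes are bounded by the input length):
-- a different algorithm, not measured faster in CPython.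

-- ===== PORT A =====
def bitewiseCutpointsToSegments (inputArray : List Int) : List Int :=
  let st := inputArray.foldl
    (fun (st : List Int × Int) bit =>
      if bit == 0 then (st.1, st.2 + 1) else (st.1 ++ [st.2 + 1], (0 : Int)))
    ([], -1)
  PySem.List.sorted (st.1 ++ [st.2 + 1]) (fun x => x) false

-- ===== PORT B =====
-- counts[k] += 1 : the index k = i - prev (resp. n - prev) is always in range
-- (0 ≤ prev ≤ i ≤ n, counts has length n+1), so List.set at (i-prev).toNat is exact.
def pvBump (c : List Nat) (k : Nat) : List Nat := c.set k (c.getD k 0 + 1)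

def bitewiseCutpointsToSegments_alt (inputArray : List Int) : List Int :=
  let n := inputArray.length
  let st := (PySem.List.enumerate inputArray).foldl
    (fun (st : List Nat × Int) p =>
      if p.2 != 0 then (pvBump st.1 (p.1 - st.2).toNat, p.1) else st)
    (List.replicate (n + 1) 0, 0)
  let counts := pvBump st.1 ((n : Int) - st.2).toNat
  -- range(n+1) with n = len(inputArray) ≥ 0 is ported exactly as List.range (n+1)
  (List.range (n + 1)).flatMap (fun s => List.replicate (counts.getD s 0) (s : Int))

-- ===== PRECONDITION & SPEC =====
def Spec_bitewiseCutpointsToSegments (inputArray : List Int) (out : List Int) : Prop := out = bitewiseCutpointsToSegments_alt inputArray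
instance (inputArray : List Int) (out : List Int) : Decidable (Spec_bitewiseCutpointsToSegments inputArray out) := by unfold Spec_bitewiseCutpointsToSegments; infer_instance

-- ===== CLAIM (what is proved, stated in full; the proofs are below) =====
def Claim_equal_bitewiseCutpointsToSegments : Prop := ∀ (inputArray : List Int), Dom_bitewiseCutpointsToSegments inputArray → Spec_bitewiseCutpointsToSegments inputArray (bitewiseCutpointsToSegments inputArray)

-- ===== LEMMAS AND PROOFS =====

-- Reference list of segment sizes, in left-to-right order.
def pvSeg : List Int → Int → List Int
  | [], size => [size + 1]
  | b :: bs, size => if b = 0 then pvSeg bs (size + 1) else (size + 1) :: pvSeg bs 0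

def pvApplyBumps (c : List Nat) (l : List Int) : List Nat :=
  l.foldl (fun c s => pvBump c s.toNat) c

lemma pvA_fold (xs : List Int) (acc : List Int) (size : Int) :
    (xs.foldl
      (fun (st : List Int × Int) bit =>
        if bit == 0 then (st.1, st.2 + 1) else (st.1 ++ [st.2 + 1], (0 : Int)))
      (acc, size)).1 ++
    [(xs.foldl
      (fun (st : List Int × Int) bit =>
        if bit == 0 then (st.1, st.2 + 1) else (st.1 ++ [st.2 + 1], (0 : Int)))
      (acc, size)).2 + 1] = acc ++ pvSeg xs size := by
  induction xs generalizing acc size with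
  | nil => simp [pvSeg]
  | cons b bs ih =>
    by_cases hb : b = 0
    · simpa [pvSeg, hb, List.foldl_cons] using ih acc (size + 1)
    · simpa [pvSeg, hb, List.foldl_cons] using ih (acc ++ [size + 1]) 0

lemma pvSeg_bounds (xs : List Int) (size : Int) (hsz : -1 ≤ size) :
    ∀ s ∈ pvSeg xs size, 0 ≤ s ∧ s ≤ size + 1 + xs.length := by
  induction xs generalizing size with
  | nil => intro s hs; simp [pvSeg] at hs; omega
  | cons b bs ih =>
    intro s hs
    by_cases hb : b = 0
    · simp only [pvSeg, hb, if_pos] at hs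
      have := ih (size + 1) (by omega) s hs
      simp only [List.length_cons]; push_cast; omega
    · simp only [pvSeg, hb, if_neg, not_false_iff, List.mem_cons] at hs
      rcases hs with rfl | hs
      · simp only [List.length_cons]; push_cast; omega
      · have := ih 0 (by omega) s hs
        simp only [List.length_cons]; push_cast at this ⊢; omega

lemma pvBump_length (c : List Nat) (k : Nat) : (pvBump c k).length = c.length := by
  simp [pvBump]

lemma pvBump_getD (c : List Nat) (k j : Nat) (hk : k < c.length) :
    (pvBump c k).getD j 0 = if j = k then c.getD j 0 + 1 else c.getD j 0 := by
  simp only [pvBump, List.getD_eq_getElem?_getD, List.getElem?_set]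
  by_cases h : j = k
  · subst h
    simp [hk, List.getD_eq_getElem?_getD, List.getElem?_eq_getElem hk]
  · rw [if_neg (fun hh : k = j => h hh.symm), if_neg h]

lemma pvApplyBumps_length (c : List Nat) (l : List Int) :
    (pvApplyBumps c l).length = c.length := by
  induction l generalizing c with
  | nil => rfl
  | cons s l ih => simp [pvApplyBumps, List.foldl_cons] at ih ⊢; rw [ih, pvBump_length]

lemma pvApplyBumps_getD (l : List Int) (c : List Nat)
    (h : ∀ s ∈ l, 0 ≤ s ∧ s.toNat < c.length) (k : Nat) :
    (pvApplyBumps c l).getD k 0 = c.getD k 0 + l.count (k : Int) := by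
  induction l generalizing c with
  | nil => simp [pvApplyBumps]
  | cons s l ih =>
    obtain ⟨hs0, hsl⟩ := h s (List.mem_cons_self ..)
    have step : pvApplyBumps c (s :: l) = pvApplyBumps (pvBump c s.toNat) l := rfl
    rw [step, ih (pvBump c s.toNat) (fun t ht => by
        have := h t (List.mem_cons_of_mem _ ht); rwa [pvBump_length]),
      pvBump_getD c s.toNat k hsl, List.count_cons]
    by_cases hk : k = s.toNat
    · rw [if_pos hk, if_pos (by simp; omega : (s == (k : Int)) = true)]; omega
    · rw [if_neg hk, if_neg (by simp; omega : ¬(s == (k : Int)) = true)]; omega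

lemma pvB_fold (xs : List Int) (i : Int) (c : List Nat) (size : Int) :
    (let st := (PySem.List.enumerate xs i).foldl
      (fun (st : List Nat × Int) p =>
        if p.2 != 0 then (pvBump st.1 (p.1 - st.2).toNat, p.1) else st)
      (c, i - size - 1)
     pvBump st.1 ((i + xs.length : Int) - st.2).toNat) = pvApplyBumps c (pvSeg xs size) := by
  induction xs generalizing i c size with
  | nil => simp [PySem.List.enumerate_nil, pvSeg, pvApplyBumps]; ring_nf
  | cons b bs ih =>
    rw [PySem.List.enumerate_cons, List.foldl_cons]
    by_cases hb : b = 0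
    · have e : i - size - 1 = (i + 1) - (size + 1) - 1 := by ring
      have e2 : (i + (((0 : Int) :: bs).length : Int)) = (i + 1) + (bs.length : Int) := by
        simp only [List.length_cons]; push_cast; ring
      simp only [hb, bne_self_eq_false, Bool.false_eq_true, if_false, if_neg, e, e2,
        pvSeg, if_pos]
      exact ih (i + 1) c (size + 1)
    · have hb' : (b != 0) = true := by simpa using hb
      have e0 : i - (i - size - 1) = size + 1 := by ring
      have e : (i : Int) = (i + 1) - 0 - 1 := by ring
      have e2 : (i + ((b :: bs).length : Int)) = (i + 1) + (bs.length : Int) := by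
        simp only [List.length_cons]; push_cast; ring
      simp only [hb', if_true, e0, pvSeg, hb, if_neg, not_false_iff]
      have step : pvApplyBumps c ((size + 1) :: pvSeg bs 0)
          = pvApplyBumps (pvBump c (size + 1).toNat) (pvSeg bs 0) := rfl
      rw [step]
      calc _ = pvBump ((PySem.List.enumerate bs (i + 1)).foldl
            (fun (st : List Nat × Int) p =>
              if p.2 != 0 then (pvBump st.1 (p.1 - st.2).toNat, p.1) else st)
            (pvBump c (size + 1).toNat, (i + 1) - 0 - 1)).1
            (((i + 1) + (bs.length : Int)) - ((PySem.List.enumerate bs (i + 1)).foldl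
            (fun (st : List Nat × Int) p =>
              if p.2 != 0 then (pvBump st.1 (p.1 - st.2).toNat, p.1) else st)
            (pvBump c (size + 1).toNat, (i + 1) - 0 - 1)).2).toNat := by
            rw [← e, ← e2]
        _ = _ := ih (i + 1) (pvBump c (size + 1).toNat) 0

lemma pvEmit_pairwise (c : List Nat) (m : Nat) :
    ((List.range m).flatMap (fun s => List.replicate (c.getD s 0) (s : Int))).Pairwise (· ≤ ·) := by
  induction m with
  | zero => simp
  | succ m ih =>
    rw [List.range_succ, List.flatMap_append]
    rw [List.pairwise_append]
    refine ⟨ih, ?_, ?_⟩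
    · simp only [List.flatMap_cons, List.flatMap_nil, List.append_nil]
      exact List.pairwise_replicate.mpr (Or.inr le_rfl)
    · intro a ha b hb
      simp only [List.flatMap_cons, List.flatMap_nil, List.append_nil] at hb
      obtain ⟨s, hs, ha'⟩ := List.mem_flatMap.mp ha
      rw [List.eq_of_mem_replicate ha', List.eq_of_mem_replicate hb]
      exact_mod_cast Nat.le_of_lt (List.mem_range.mp hs)

lemma pvEmit_count (c : List Nat) (m : Nat) (t : Int) :
    ((List.range m).flatMap (fun s => List.replicate (c.getD s 0) (s : Int))).count t
      = if 0 ≤ t ∧ t.toNat < m then c.getD t.toNat 0 else 0 := by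
  induction m with
  | zero => simp
  | succ m ih =>
    rw [List.range_succ, List.flatMap_append, List.count_append, ih]
    simp only [List.flatMap_cons, List.flatMap_nil, List.append_nil, List.count_replicate]
    by_cases h1 : 0 ≤ t ∧ t.toNat < m
    · rw [if_pos h1, if_pos (by omega : 0 ≤ t ∧ t.toNat < m + 1),
        if_neg (by simp; omega : ¬((m : Int) == t) = true)]
      ring
    · rw [if_neg h1]
      by_cases h2 : t = (m : Int)
      · rw [if_pos (by simp [h2] : ((m : Int) == t) = true), if_pos (by omega), h2]
        simp
      · rw [if_neg (by simp; omega : ¬((m : Int) == t) = true), if_neg (by omega)]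

lemma pvMain (xs : List Int) :
    bitewiseCutpointsToSegments xs = bitewiseCutpointsToSegments_alt xs := by
  have hA : bitewiseCutpointsToSegments xs
      = PySem.List.sorted (pvSeg xs (-1)) (fun x => x) false := by
    simp only [bitewiseCutpointsToSegments]
    rw [pvA_fold xs [] (-1), List.nil_append]
  have hcf : pvBump ((PySem.List.enumerate xs 0).foldl
        (fun (st : List Nat × Int) p =>
          if p.2 != 0 then (pvBump st.1 (p.1 - st.2).toNat, p.1) else st)
        (List.replicate (xs.length + 1) 0, 0)).1
        (((xs.length : Int)) - ((PySem.List.enumerate xs 0).foldl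
        (fun (st : List Nat × Int) p =>
          if p.2 != 0 then (pvBump st.1 (p.1 - st.2).toNat, p.1) else st)
        (List.replicate (xs.length + 1) 0, 0)).2).toNat
      = pvApplyBumps (List.replicate (xs.length + 1) 0) (pvSeg xs (-1)) := by
    have := pvB_fold xs 0 (List.replicate (xs.length + 1) 0) (-1)
    simp only at this
    rw [← this]
    norm_num
  set seg := pvSeg xs (-1) with hseg
  set cf := pvApplyBumps (List.replicate (xs.length + 1) 0) seg with hcfd
  have hB : bitewiseCutpointsToSegments_alt xs
      = (List.range (xs.length + 1)).flatMap
          (fun s => List.replicate (cf.getD s 0) (s : Int)) := by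
    simp only [bitewiseCutpointsToSegments_alt]
    rw [hcf]
  have hbnd : ∀ s ∈ seg, 0 ≤ s ∧ s ≤ (xs.length : Int) := by
    intro s hs
    have := pvSeg_bounds xs (-1) (by omega) s hs
    omega
  have hlen : cf.length = xs.length + 1 := by
    rw [hcfd, pvApplyBumps_length, List.length_replicate]
  have hgetD : ∀ k : Nat, k < xs.length + 1 → cf.getD k 0 = seg.count (k : Int) := by
    intro k hk
    rw [hcfd, pvApplyBumps_getD seg _ (fun s hs => by
      have := hbnd s hs
      constructor
      · exact this.1
      · rw [List.length_replicate]; omega) k]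
    simp [List.getD_eq_getElem?_getD, List.getElem?_replicate, hk]
  have hperm : ((List.range (xs.length + 1)).flatMap
      (fun s => List.replicate (cf.getD s 0) (s : Int))).Perm seg := by
    rw [List.perm_iff_count]
    intro t
    rw [pvEmit_count cf (xs.length + 1) t]
    by_cases ht : 0 ≤ t ∧ t.toNat < xs.length + 1
    · rw [if_pos ht, hgetD t.toNat ht.2]
      congr 1
      omega
    · rw [if_neg ht]
      symm
      rw [List.count_eq_zero]
      intro hmem
      have := hbnd t hmem
      omega
  rw [hA, hB]
  exact PySem.List.sorted_id_eq_of_perm_of_pairwise seg _ hperm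
    (pvEmit_pairwise cf (xs.length + 1))

-- ===== VERDICT (by name: the statement is the Claim_ definition above) =====
theorem bitewiseCutpointsToSegments_spec : Claim_equal_bitewiseCutpointsToSegments := by
  intro xs _
  exact pvMain xs
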